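-- pv_equiv track=rewrite | github.com/abhay071-ux/IML-LAB | Exp-8.py | update
-- ===== SOURCE A (Python) =====
-- def update(clusters):
--     new_medoids = []
--     for cluster in clusters.values():
--         costs = []
--         for p in cluster:
--             cost = sum(abs(p - x) for x in cluster)
--             costs.append(cost)
--         new_medoids.append(cluster[costs.index(min(costs))])
--     return new_medoids
-- ===== SOURCE B (Python) =====
-- def update(clusters):
--     new_medoids = []
--     for cluster in clusters.values():
--         s = sorted(cluster)
--         n = len(s)
--         lo = s[(n - 1) // 2]
--         hi = s[n // 2]
--         for p in cluster:
--             if lo <= p <= hi: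
--                 new_medoids.append(p)
--                 break
--     return new_medoids
-- ===== Notes on version B (the rewrite author's own statement) =====
-- stated objective: faster
-- what changed: B sorts each cluster and returns the first point lying in the closed median interval [s[(n-1)//2], s[n//2]] (exactly the minimizers of the absolute-distance sum), instead of A's all-pairs cost computation.
import Mathlib
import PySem

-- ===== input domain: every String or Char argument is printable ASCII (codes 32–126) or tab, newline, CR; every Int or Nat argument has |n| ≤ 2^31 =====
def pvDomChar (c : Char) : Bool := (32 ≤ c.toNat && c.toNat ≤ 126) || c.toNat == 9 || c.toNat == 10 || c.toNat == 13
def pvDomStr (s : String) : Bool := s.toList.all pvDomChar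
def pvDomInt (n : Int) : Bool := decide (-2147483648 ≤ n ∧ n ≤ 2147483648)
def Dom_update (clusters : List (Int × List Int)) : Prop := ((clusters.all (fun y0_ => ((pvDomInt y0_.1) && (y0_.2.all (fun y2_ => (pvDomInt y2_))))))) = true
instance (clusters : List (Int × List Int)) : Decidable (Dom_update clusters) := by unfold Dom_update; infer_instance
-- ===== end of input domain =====

-- B sorts each cluster and takes the first point inside the closed median interval (the exact minimizers of the absolute-distance sum) instead of A's all-pairs cost scan; same return value proved.

-- ===== PORT A =====
def update (clusters : List (Int × List Int)) : List Int :=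
  (PySem.Dict.ofList clusters).values.foldl (fun new_medoids cluster =>
    let costs := cluster.foldl (fun costs p =>
      costs ++ [(cluster.map (fun x => |p - x|)).sum]) []
    new_medoids ++ [PySem.List.pyGetD cluster
      (((PySem.List.index? costs ((PySem.List.min? costs (fun c => c)).getD 0)).getD 0 : Nat) : Int) 0]) []

-- ===== PORT B =====
def update_alt (clusters : List (Int × List Int)) : List Int :=
  (PySem.Dict.ofList clusters).values.foldl (fun new_medoids cluster =>
    let s := PySem.List.sorted cluster (fun x => x) false
    let n := s.length
    let lo := PySem.List.pyGetD s (PySem.Int.floordiv ((n : Int) - 1) 2) 0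
    let hi := PySem.List.pyGetD s (PySem.Int.floordiv (n : Int) 2) 0
    match cluster.find? (fun p => decide (lo ≤ p) && decide (p ≤ hi)) with
    | some p => new_medoids ++ [p]
    | none => new_medoids) []

-- ===== PRECONDITION & SPEC =====
-- Pre_ excludes inputs where some cluster value list is empty: there Python A raises ValueError (min of an empty sequence), and B raises IndexError.
def Pre_update (clusters : List (Int × List Int)) : Prop :=
  ∀ v ∈ (PySem.Dict.ofList clusters).values, v ≠ []
instance (clusters : List (Int × List Int)) : Decidable (Pre_update clusters) := by unfold Pre_update; infer_instance
def pvWitness_update : (List (Int × List Int)) := [(0, [1, 2, 2]), (1, [5])]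

def Spec_update (clusters : List (Int × List Int)) (out : List Int) : Prop := out = update_alt clusters
instance (clusters : List (Int × List Int)) (out : List Int) : Decidable (Spec_update clusters out) := by unfold Spec_update; infer_instance

-- ===== CLAIM (what is proved, stated in full; the proofs are below) =====
def Claim_equal_update : Prop := ∀ (clusters : List (Int × List Int)), Dom_update clusters → Pre_update clusters → Spec_update clusters (update clusters)

-- ===== LEMMAS AND PROOFS =====

theorem fdiv_lo (n : Nat) (h : 1 ≤ n) :
    PySem.Int.floordiv ((n : Int) - 1) 2 = (((n - 1) / 2 : Nat) : Int) := by
  unfold PySem.Int.floordiv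
  rw [Int.fdiv_eq_ediv]
  norm_num
  omega

theorem fdiv_hi (n : Nat) :
    PySem.Int.floordiv (n : Int) 2 = ((n / 2 : Nat) : Int) := by
  unfold PySem.Int.floordiv
  rw [Int.fdiv_eq_ediv]
  norm_num

theorem sum_map_if (l : List Int) (P : Int → Prop) [DecidablePred P] (c : Int) :
    (l.map (fun x => if P x then c else -c)).sum
      = c * (2 * (l.countP (fun x => decide (P x)) : Int) - (l.length : Int)) := by
  induction l with
  | nil => simp
  | cons a t ih =>
    simp only [List.map_cons, List.sum_cons, List.countP_cons, ih, List.length_cons]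
    by_cases h : P a
    · simp only [h, decide_true, if_true]
      push_cast; ring
    · simp only [h, decide_false, Bool.false_eq_true, if_false]
      push_cast; ring

-- every element of a sorted list lies below the lower median or above the upper median
theorem median_dichotomy (s : List Int) (hs : s.Pairwise (fun a b => a ≤ b)) (m1 m2 : Nat)
    (h1 : m1 < s.length) (h2 : m2 < s.length) (h21 : m2 ≤ m1 + 1)
    (x : Int) (hx : x ∈ s) : x ≤ s[m1] ∨ s[m2] ≤ x := by
  have hpg := List.pairwise_iff_getElem.mp hs
  obtain ⟨j, hj, rfl⟩ := List.getElem_of_mem hx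
  rcases Nat.lt_or_ge j m2 with h | h
  · left
    have hjm1 : j ≤ m1 := by omega
    rcases Nat.eq_or_lt_of_le hjm1 with e | e
    · subst e; exact le_rfl
    · exact hpg j m1 hj h1 e
  · right
    rcases Nat.eq_or_lt_of_le h with e | e
    · subst e; exact le_rfl
    · exact hpg m2 j h2 hj e

theorem countP_ge_of_drop (s : List Int) (hs : s.Pairwise (fun a b => a ≤ b)) (m : Nat)
    (h : m < s.length) :
    s.length - m ≤ s.countP (fun x => decide (s[m] ≤ x)) := by
  have hpg := List.pairwise_iff_getElem.mp hs
  have hsplit := List.countP_append (p := fun x => decide (s[m] ≤ x))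
    (l₁ := s.take m) (l₂ := s.drop m)
  rw [List.take_append_drop] at hsplit
  have hdrop : (s.drop m).countP (fun x => decide (s[m] ≤ x)) = (s.drop m).length := by
    rw [List.countP_eq_length]
    intro a ha
    obtain ⟨j, hj, rfl⟩ := List.getElem_of_mem ha
    rw [List.getElem_drop]
    simp only [decide_eq_true_eq]
    rcases Nat.eq_zero_or_pos j with rfl | hj0
    · exact le_rfl
    · have hj' : m + j < s.length := by
        have := hj
        simp only [List.length_drop] at this
        omega
      exact hpg m (m + j) h hj' (by omega)
  rw [hsplit, hdrop, List.length_drop]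
  omega

theorem countP_ge_of_take (s : List Int) (hs : s.Pairwise (fun a b => a ≤ b)) (m : Nat)
    (h : m < s.length) :
    m + 1 ≤ s.countP (fun x => decide (x ≤ s[m])) := by
  have hpg := List.pairwise_iff_getElem.mp hs
  have hsplit := List.countP_append (p := fun x => decide (x ≤ s[m]))
    (l₁ := s.take (m + 1)) (l₂ := s.drop (m + 1))
  rw [List.take_append_drop] at hsplit
  have htake : (s.take (m + 1)).countP (fun x => decide (x ≤ s[m])) = (s.take (m + 1)).length := by
    rw [List.countP_eq_length]
    intro a ha
    obtain ⟨j, hj, rfl⟩ := List.getElem_of_mem ha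
    rw [List.getElem_take]
    simp only [decide_eq_true_eq]
    have hjm : j ≤ m := by
      have := hj
      simp only [List.length_take] at this
      omega
    rcases Nat.eq_or_lt_of_le hjm with e | e
    · subst e; exact le_rfl
    · exact hpg j m (by omega) h e
  have hlt : m + 1 ≤ (s.take (m + 1)).length := by
    simp only [List.length_take]
    omega
  omega

-- strictly cheaper to be at the lower median than strictly left of it
theorem cost_lt_left (s : List Int) (hs : s.Pairwise (fun a b => a ≤ b)) (m1 : Nat)
    (h1 : m1 < s.length) (hhalf : 2 * m1 + 1 ≤ s.length) (p : Int) (hp : p < s[m1]) :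
    (s.map (fun x => |s[m1] - x|)).sum < (s.map (fun x => |p - x|)).sum := by
  have hpt : ∀ x ∈ s,
      |s[m1] - x| + (if s[m1] ≤ x then s[m1] - p else -(s[m1] - p)) ≤ |p - x| := by
    intro x _
    by_cases h : s[m1] ≤ x
    · rw [if_pos h, abs_of_nonpos (by omega), abs_of_nonpos (by omega)]
      omega
    · rw [if_neg h, abs_of_nonneg (by omega)]
      have h2 := le_abs_self (p - x)
      omega
  have hsum := List.sum_le_sum hpt
  rw [List.sum_map_add, sum_map_if] at hsum
  have hcnt := countP_ge_of_drop s hs m1 h1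
  have h1' : (1 : Int) ≤ 2 * (s.countP (fun x => decide (s[m1] ≤ x)) : Int) - (s.length : Int) := by
    omega
  have hmul : s[m1] - p ≤ (s[m1] - p) *
      (2 * (s.countP (fun x => decide (s[m1] ≤ x)) : Int) - (s.length : Int)) :=
    le_mul_of_one_le_right (by omega) h1'
  have hp' : (0 : Int) < s[m1] - p := by omega
  linarith

-- strictly cheaper to be at the upper median than strictly right of it
theorem cost_lt_right (s : List Int) (hs : s.Pairwise (fun a b => a ≤ b)) (m2 : Nat)
    (h2 : m2 < s.length) (hhalf : s.length ≤ 2 * m2 + 1) (p : Int) (hp : s[m2] < p) :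
    (s.map (fun x => |s[m2] - x|)).sum < (s.map (fun x => |p - x|)).sum := by
  have hpt : ∀ x ∈ s,
      |s[m2] - x| + (if x ≤ s[m2] then p - s[m2] else -(p - s[m2])) ≤ |p - x| := by
    intro x _
    by_cases h : x ≤ s[m2]
    · rw [if_pos h, abs_of_nonneg (by omega), abs_of_nonneg (by omega)]
      omega
    · rw [if_neg h, abs_of_nonpos (by omega)]
      have h3 : x - p ≤ |p - x| := by
        rw [abs_sub_comm]
        exact le_abs_self (x - p)
      omega
  have hsum := List.sum_le_sum hpt
  rw [List.sum_map_add, sum_map_if] at hsum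
  have hcnt := countP_ge_of_take s hs m2 h2
  have h1' : (1 : Int) ≤ 2 * (s.countP (fun x => decide (x ≤ s[m2])) : Int) - (s.length : Int) := by
    omega
  have hmul : p - s[m2] ≤ (p - s[m2]) *
      (2 * (s.countP (fun x => decide (x ≤ s[m2])) : Int) - (s.length : Int)) :=
    le_mul_of_one_le_right (by omega) h1'
  have hp' : (0 : Int) < p - s[m2] := by omega
  linarith

-- the cost is constant on the closed median interval
theorem cost_eq_interval (s : List Int) (hs : s.Pairwise (fun a b => a ≤ b)) (m1 m2 : Nat)
    (h1 : m1 < s.length) (h2 : m2 < s.length) (h21 : m2 ≤ m1 + 1)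
    (heven : m1 ≠ m2 → 2 * m2 = s.length)
    (v w : Int) (hv : s[m1] ≤ v) (hvw : v ≤ w) (hw : w ≤ s[m2]) :
    (s.map (fun x => |v - x|)).sum = (s.map (fun x => |w - x|)).sum := by
  rcases eq_or_lt_of_le hvw with rfl | hvw'
  · rfl
  have hpg := List.pairwise_iff_getElem.mp hs
  have hlohi : s[m1] < s[m2] := by omega
  have hne12 : m1 ≠ m2 := fun e => by subst e; exact lt_irrefl _ hlohi
  have hn := heven hne12
  have hpt : ∀ x ∈ s, |w - x| = |v - x| + (if s[m2] ≤ x then v - w else -(v - w)) := by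
    intro x hx
    rcases median_dichotomy s hs m1 m2 h1 h2 h21 x hx with hxl | hxr
    · rw [if_neg (by omega), abs_of_nonneg (by omega), abs_of_nonneg (by omega)]
      omega
    · rw [if_pos hxr, abs_of_nonpos (by omega), abs_of_nonpos (by omega)]
      omega
  have hmap : (s.map (fun x => |w - x|)).sum
      = (s.map (fun x => |v - x| + (if s[m2] ≤ x then v - w else -(v - w)))).sum :=
    congrArg List.sum (List.map_congr_left hpt)
  rw [hmap, List.sum_map_add, sum_map_if]
  -- the count of elements ≥ s[m2] is exactly s.length - m2
  have hlow := countP_ge_of_drop s hs m2 h2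
  have hup : s.countP (fun x => decide (s[m2] ≤ x)) ≤ s.length - m2 := by
    have hsplit := List.countP_append (p := fun x => decide (s[m2] ≤ x))
      (l₁ := s.take m2) (l₂ := s.drop m2)
    rw [List.take_append_drop] at hsplit
    have htake : (s.take m2).countP (fun x => decide (s[m2] ≤ x)) = 0 := by
      rw [List.countP_eq_zero]
      intro a ha
      obtain ⟨j, hj, rfl⟩ := List.getElem_of_mem ha
      rw [List.getElem_take]
      simp only [decide_eq_true_eq, not_le]
      have hjm : j < m2 := by
        have := hj
        simp only [List.length_take] at this
        omega
      have hja : j ≤ m1 := by omega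
      have hle : s[j] ≤ s[m1] := by
        rcases Nat.eq_or_lt_of_le hja with e | e
        · subst e; exact le_rfl
        · exact hpg j m1 (by omega) h1 e
      omega
    have hdl := List.countP_le_length (p := fun x => decide (s[m2] ≤ x)) (l := s.drop m2)
    rw [hsplit, htake, List.length_drop] at *
    omega
  have hzero : 2 * (s.countP (fun x => decide (s[m2] ≤ x)) : Int) - (s.length : Int) = 0 := by
    omega
  rw [hzero, mul_zero, add_zero]

-- first argmin over mapped costs = first element satisfying the characterising predicate
theorem sel_eq (l : List Int) (f : Int → Int) (m : Int) (P : Int → Bool)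
    (hiff : ∀ p ∈ l, (f p = m ↔ P p = true)) (hex : ∃ p ∈ l, P p = true) :
    l.find? P = some (PySem.List.pyGetD l
      (((PySem.List.index? (l.map f) m).getD 0 : Nat) : Int) 0) := by
  induction l with
  | nil =>
    obtain ⟨p, hp, _⟩ := hex
    cases hp
  | cons a t ih =>
    by_cases hPa : P a = true
    · rw [List.find?_cons_of_pos hPa]
      have hfa : f a = m := (hiff a (by simp)).mpr hPa
      rw [List.map_cons, hfa, PySem.List.index?_cons_self]
      simp [PySem.List.pyGetD_zero_cons]
    · rw [List.find?_cons_of_neg hPa]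
      have hfa : f a ≠ m := fun e => hPa ((hiff a (by simp)).mp e)
      have hex' : ∃ p ∈ t, P p = true := by
        obtain ⟨p, hp, hPp⟩ := hex
        rcases List.mem_cons.mp hp with rfl | h
        · exact absurd hPp hPa
        · exact ⟨p, h, hPp⟩
      have hiff' : ∀ p ∈ t, (f p = m ↔ P p = true) :=
        fun p hp => hiff p (List.mem_cons_of_mem a hp)
      have hmem : m ∈ t.map f := by
        obtain ⟨p, hp, hPp⟩ := hex'
        exact List.mem_map.mpr ⟨p, hp, (hiff' p hp).mpr hPp⟩
      obtain ⟨j, hj⟩ : ∃ j, PySem.List.index? (t.map f) m = some j :=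
        Option.isSome_iff_exists.mp ((PySem.List.index?_isSome_iff _ _).mpr hmem)
      have ihh := ih hiff' hex'
      rw [hj] at ihh
      simp only [Option.getD_some] at ihh
      rw [List.map_cons, PySem.List.index?_cons_of_ne _ hfa, hj]
      simp only [Option.map_some, Option.getD_some]
      rw [ihh]
      congr 1
      rw [PySem.List.pyGetD_natCast, PySem.List.pyGetD_natCast, List.getD_cons_succ]

-- the per-cluster bodies of the two folds agree on every nonempty cluster
theorem body_eq (acc : List Int) (cluster : List Int) (hne : cluster ≠ []) :
    (let costs := cluster.foldl (fun costs p =>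
        costs ++ [(cluster.map (fun x => |p - x|)).sum]) [];
      acc ++ [PySem.List.pyGetD cluster
        (((PySem.List.index? costs ((PySem.List.min? costs (fun c => c)).getD 0)).getD 0 : Nat) : Int) 0]) =
    (let s := PySem.List.sorted cluster (fun x => x) false;
      let n := s.length;
      let lo := PySem.List.pyGetD s (PySem.Int.floordiv ((n : Int) - 1) 2) 0;
      let hi := PySem.List.pyGetD s (PySem.Int.floordiv (n : Int) 2) 0;
      match cluster.find? (fun p => decide (lo ≤ p) && decide (p ≤ hi)) with
      | some p => acc ++ [p]
      | none => acc) := by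
  have hA := PySem.List.foldl_append_singleton_eq_map
    (fun p => (cluster.map (fun x => |p - x|)).sum) cluster ([] : List Int)
  simp only [List.nil_append] at hA
  simp only [hA]
  set s := PySem.List.sorted cluster (fun x => x) false with hsdef
  have hperm : s.Perm cluster := by
    rw [hsdef]; exact PySem.List.sorted_perm cluster (fun x => x) false
  have hpair : s.Pairwise (fun a b => a ≤ b) := by
    rw [hsdef]; exact PySem.List.sorted_pairwise cluster (fun x => x)
  have hsne : s ≠ [] := by
    rw [hsdef]
    simpa [PySem.List.sorted_eq_nil_iff] using hne
  have hn1 : 1 ≤ s.length := by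
    have := List.length_pos_iff.mpr hsne
    omega
  have hm1 : (s.length - 1) / 2 < s.length := by omega
  have hm2 : s.length / 2 < s.length := by omega
  have hlo : PySem.List.pyGetD s (PySem.Int.floordiv ((s.length : Int) - 1) 2) 0
      = s[(s.length - 1) / 2]'hm1 := by
    rw [fdiv_lo s.length hn1, PySem.List.pyGetD_natCast]
    exact List.getD_eq_getElem s 0 hm1
  have hhi : PySem.List.pyGetD s (PySem.Int.floordiv ((s.length : Int)) 2) 0
      = s[s.length / 2]'hm2 := by
    rw [fdiv_hi s.length, PySem.List.pyGetD_natCast]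
    exact List.getD_eq_getElem s 0 hm2
  rw [hlo, hhi]
  -- abbreviations
  have hpg := List.pairwise_iff_getElem.mp hpair
  have hLOHI : s[(s.length - 1) / 2]'hm1 ≤ s[s.length / 2]'hm2 := by
    rcases Nat.lt_or_ge ((s.length - 1) / 2) (s.length / 2) with h | h
    · exact hpg _ _ hm1 hm2 h
    · have he : (s.length - 1) / 2 = s.length / 2 := by omega
      exact le_of_eq (by simp only [he])
  have hhalf1 : 2 * ((s.length - 1) / 2) + 1 ≤ s.length := by omega
  have hhalf2 : s.length ≤ 2 * (s.length / 2) + 1 := by omega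
  have h21 : s.length / 2 ≤ (s.length - 1) / 2 + 1 := by omega
  have heven : (s.length - 1) / 2 ≠ s.length / 2 → 2 * (s.length / 2) = s.length := by
    intro h; omega
  have hfc : ∀ v : Int,
      (cluster.map (fun x => |v - x|)).sum = (s.map (fun x => |v - x|)).sum :=
    fun v => (List.Perm.sum_eq (hperm.map _)).symm
  have hLOmem : s[(s.length - 1) / 2]'hm1 ∈ cluster :=
    hperm.mem_iff.mp (List.getElem_mem hm1)
  -- the minimum cost exists and equals the cost at the lower median
  have hcne : cluster.map (fun p => (cluster.map (fun x => |p - x|)).sum) ≠ [] := by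
    simpa using hne
  obtain ⟨mv, hmv⟩ : ∃ mv, PySem.List.min?
      (cluster.map (fun p => (cluster.map (fun x => |p - x|)).sum)) (fun c => c) = some mv := by
    cases h : PySem.List.min?
        (cluster.map (fun p => (cluster.map (fun x => |p - x|)).sum)) (fun c => c) with
    | none => exact absurd ((PySem.List.min?_eq_none_iff _ _).mp h) hcne
    | some mv => exact ⟨mv, rfl⟩
  rw [hmv]
  simp only [Option.getD_some]
  have hmvmem := PySem.List.min?_mem hmv
  have hmvmin := PySem.List.min?_isMin hmv
  -- a generic lower bound: every cluster point's cost is at least the lower median's cost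
  have hgeLO : ∀ q ∈ cluster,
      (s.map (fun x => |(s[(s.length - 1) / 2]'hm1) - x|)).sum ≤ (s.map (fun x => |q - x|)).sum := by
    intro q hq
    rcases lt_or_ge q (s[(s.length - 1) / 2]'hm1) with h | h
    · exact le_of_lt (cost_lt_left s hpair _ hm1 hhalf1 q h)
    · rcases lt_or_ge (s[s.length / 2]'hm2) q with h2 | h2
      · have h3 := cost_lt_right s hpair _ hm2 hhalf2 q h2
        have h4 := cost_eq_interval s hpair _ _ hm1 hm2 h21 heven
          (s[(s.length - 1) / 2]'hm1) (s[s.length / 2]'hm2) le_rfl hLOHI le_rfl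
        omega
      · exact le_of_eq (cost_eq_interval s hpair _ _ hm1 hm2 h21 heven _ q le_rfl h h2)
  have hmveq : mv = (cluster.map (fun x => |(s[(s.length - 1) / 2]'hm1) - x|)).sum := by
    have hle : mv ≤ (cluster.map (fun x => |(s[(s.length - 1) / 2]'hm1) - x|)).sum :=
      hmvmin _ (List.mem_map_of_mem hLOmem)
    obtain ⟨q, hq, hfq⟩ := List.mem_map.mp hmvmem
    have hge := hgeLO q hq
    rw [← hfc q, ← hfc (s[(s.length - 1) / 2]'hm1)] at hge
    omega
  -- characterisation: a cluster point has minimal cost iff it lies in the median interval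
  have hiff : ∀ p ∈ cluster,
      ((cluster.map (fun x => |p - x|)).sum = mv ↔
        (decide ((s[(s.length - 1) / 2]'hm1) ≤ p) && decide (p ≤ s[s.length / 2]'hm2)) = true) := by
    intro p hp
    simp only [Bool.and_eq_true, decide_eq_true_eq]
    constructor
    · intro he
      constructor
      · by_contra hc
        have h := cost_lt_left s hpair _ hm1 hhalf1 p (by omega)
        rw [← hfc p, ← hfc (s[(s.length - 1) / 2]'hm1)] at h
        omega
      · by_contra hc
        have h := cost_lt_right s hpair _ hm2 hhalf2 p (by omega)
        have h4 := cost_eq_interval s hpair _ _ hm1 hm2 h21 heven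
          (s[(s.length - 1) / 2]'hm1) (s[s.length / 2]'hm2) le_rfl hLOHI le_rfl
        rw [← hfc p, ← hfc (s[s.length / 2]'hm2)] at h
        rw [← hfc (s[(s.length - 1) / 2]'hm1), ← hfc (s[s.length / 2]'hm2)] at h4
        omega
    · intro ⟨hb1, hb2⟩
      have h := cost_eq_interval s hpair _ _ hm1 hm2 h21 heven
        (s[(s.length - 1) / 2]'hm1) p le_rfl hb1 hb2
      rw [← hfc p, ← hfc (s[(s.length - 1) / 2]'hm1)] at h
      omega
  have hex : ∃ p ∈ cluster,
      (decide ((s[(s.length - 1) / 2]'hm1) ≤ p) && decide (p ≤ s[s.length / 2]'hm2)) = true :=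
    ⟨s[(s.length - 1) / 2]'hm1, hLOmem, by simp [hLOHI]⟩
  rw [sel_eq cluster (fun p => (cluster.map (fun x => |p - x|)).sum) mv _ hiff hex]

-- ===== VERDICT (by name: the statement is the Claim_ definition above) =====
theorem update_spec : Claim_equal_update := by
  intro clusters _ hpre
  unfold Spec_update update update_alt
  exact PySem.List.foldl_congr_mem _ _ _ [] (fun acc x hx => body_eq acc x (hpre x hx))
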